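-- pv_equiv track=rewrite | github.com/open-compass/VLMEvalKit | vlmeval/dataset/utils/mmhelix/evaluators/tapa_eval.py | _check_single_connected_group
-- ===== SOURCE A (Python) =====
-- from typing import Dict, Any, List, Tuple, Set
-- from collections import deque
--
-- def _check_single_connected_group(grid: List[List[str]]) -> bool:
--     """检查所有黑色细胞是否形成单一连通组"""
--     rows, cols = len(grid), len(grid[0])
--     black_cells = []
--
--     # 找到所有黑色细胞
--     for i in range(rows):
--         for j in range(cols):
--             if grid[i][j] == 'B':
--                 black_cells.append((i, j))
--
--     if not black_cells:
--         return True  # 没有黑色细胞也算有效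
--
--     # 从第一个黑色细胞开始BFS
--     start = black_cells[0]
--     visited = set([start])
--     queue = deque([start])
--
--     directions = [(-1, 0), (1, 0), (0, -1), (0, 1)]  # 上下左右
--
--     while queue:
--         x, y = queue.popleft()
--
--         for dx, dy in directions:
--             nx, ny = x + dx, y + dy
--             if (0 <= nx < rows and 0 <= ny < cols
--                     and (nx, ny) not in visited and grid[nx][ny] == 'B'):
--                 visited.add((nx, ny))
--                 queue.append((nx, ny))
--
--     return len(visited) == len(black_cells)
-- ===== SOURCE B (Python) =====
-- def _check_single_connected_group(grid):
--     rows, cols = len(grid), len(grid[0])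
--     black = [(i, j) for i in range(rows) for j in range(cols) if grid[i][j] == 'B']
--     if not black:
--         return True
--     comp = {black[0]}
--     changed = True
--     while changed:
--         changed = False
--         for (i, j) in black:
--             if (i, j) not in comp and ((i - 1, j) in comp or (i + 1, j) in comp
--                                        or (i, j - 1) in comp or (i, j + 1) in comp):
--                 comp.add((i, j))
--                 changed = True
--     return len(comp) == len(black)
-- ===== Notes on version B (the rewrite author's own statement) =====
-- stated objective: alternative
-- what changed: Replaces the deque-based BFS flood fill with a fixpoint saturation scheme: collect the black cells once, then repeatedly sweep the black-cell list, absorbing into the start cell's component every black cell 4-adjacent to it, until a sweep makes no change; connectivity is then the same size comparison with no queue and no per-cell visited bookkeeping.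
import Mathlib
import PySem

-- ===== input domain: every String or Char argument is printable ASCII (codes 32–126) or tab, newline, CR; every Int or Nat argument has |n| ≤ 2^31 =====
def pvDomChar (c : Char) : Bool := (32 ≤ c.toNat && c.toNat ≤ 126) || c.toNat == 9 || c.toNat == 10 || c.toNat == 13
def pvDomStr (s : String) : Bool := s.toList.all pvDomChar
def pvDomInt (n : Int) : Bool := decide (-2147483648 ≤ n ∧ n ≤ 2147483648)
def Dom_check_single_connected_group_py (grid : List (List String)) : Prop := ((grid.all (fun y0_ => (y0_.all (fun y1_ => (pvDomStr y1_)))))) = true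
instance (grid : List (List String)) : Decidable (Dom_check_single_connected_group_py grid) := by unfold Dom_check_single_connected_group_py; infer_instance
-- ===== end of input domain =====

-- B replaces A's queue-based BFS by a fixpoint label-propagation loop over the black-cell
-- list (no queue, repeated saturation passes); objective: alternative algorithm, same results.

-- ===== PORT A =====

-- grid[i][j] == 'B' (total form; Pre_ keeps every index A evaluates in range)
def pvCellB (grid : List (List String)) (i j : Int) : Bool :=
  ((PySem.List.pyGet? ((PySem.List.pyGet? grid i).getD []) j).getD "") == "B"

-- inner 'for j in range(cols): if grid[i][j]=='B': black_cells.append((i,j))'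
def pvBlackRow (grid : List (List String)) (i : Int) :
    List Int → List (Int × Int) → List (Int × Int)
  | [], acc => acc
  | j :: js, acc =>
      pvBlackRow grid i js (if pvCellB grid i j then acc ++ [(i, j)] else acc)

-- outer 'for i in range(rows): …'
def pvBlackLoop (grid : List (List String)) (cols : Int) :
    List Int → List (Int × Int) → List (Int × Int)
  | [], acc => acc
  | i :: is, acc =>
      pvBlackLoop grid cols is (pvBlackRow grid i (PySem.List.pyRange 0 cols 1) acc)

def pvDirs : List (Int × Int) := [(-1, 0), (1, 0), (0, -1), (0, 1)]

-- 'for dx, dy in directions: …' — updates (visited, queue)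
def pvScanDirs (grid : List (List String)) (rows cols x y : Int) :
    List (Int × Int) → List (Int × Int) → List (Int × Int) →
    List (Int × Int) × List (Int × Int)
  | [], visited, queue => (visited, queue)
  | d :: ds, visited, queue =>
      if 0 ≤ x + d.1 ∧ x + d.1 < rows ∧ 0 ≤ y + d.2 ∧ y + d.2 < cols ∧
          (x + d.1, y + d.2) ∉ visited ∧ pvCellB grid (x + d.1) (y + d.2) = true
      then pvScanDirs grid rows cols x y ds (PySem.Set.add visited (x + d.1, y + d.2))
             (queue ++ [(x + d.1, y + d.2)])
      else pvScanDirs grid rows cols x y ds visited queue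

-- 'while queue: x, y = queue.popleft(); …' (fuel is only a totality guard)
def pvBfsLoop (grid : List (List String)) (rows cols : Int) :
    Nat → List (Int × Int) → List (Int × Int) → List (Int × Int)
  | 0, visited, _ => visited
  | _ + 1, visited, [] => visited
  | fuel + 1, visited, p :: qs =>
      pvBfsLoop grid rows cols fuel
        (pvScanDirs grid rows cols p.1 p.2 pvDirs visited qs).1
        (pvScanDirs grid rows cols p.1 p.2 pvDirs visited qs).2

def check_single_connected_group_py (grid : List (List String)) : Bool :=
  let rows : Int := grid.length
  let cols : Int := ((PySem.List.pyGet? grid 0).getD []).length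
  let black := pvBlackLoop grid cols (PySem.List.pyRange 0 rows 1) []
  match black with
  | [] => true
  | s :: _ =>
      decide ((pvBfsLoop grid rows cols black.length (PySem.Set.ofList [s]) [s]).length
        = black.length)

-- ===== PORT B =====

-- '[(i, j) for i in range(rows) for j in range(cols) if grid[i][j] == 'B']'
def pvBlackComp (grid : List (List String)) (rows cols : Int) : List (Int × Int) :=
  (PySem.List.pyRange 0 rows 1).flatMap (fun i =>
    ((PySem.List.pyRange 0 cols 1).filter (fun j => pvCellB grid i j)).map (fun j => (i, j)))

-- one 'for (i, j) in black: …' pass; returns (comp, changed)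
def pvSatPass : List (Int × Int) → List (Int × Int) → Bool → List (Int × Int) × Bool
  | [], comp, changed => (comp, changed)
  | p :: rest, comp, changed =>
      if p ∉ comp ∧ ((p.1 - 1, p.2) ∈ comp ∨ (p.1 + 1, p.2) ∈ comp ∨
          (p.1, p.2 - 1) ∈ comp ∨ (p.1, p.2 + 1) ∈ comp)
      then pvSatPass rest (PySem.Set.add comp p) true
      else pvSatPass rest comp changed

-- 'while changed: …' (fuel is only a totality guard)
def pvSatLoop (black : List (Int × Int)) : Nat → List (Int × Int) → List (Int × Int)
  | 0, comp => comp
  | fuel + 1, comp =>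
      if (pvSatPass black comp false).2 then pvSatLoop black fuel (pvSatPass black comp false).1
      else (pvSatPass black comp false).1

def check_single_connected_group_py_alt (grid : List (List String)) : Bool :=
  let rows : Int := grid.length
  let cols : Int := ((PySem.List.pyGet? grid 0).getD []).length
  let black := pvBlackComp grid rows cols
  match black with
  | [] => true
  | s :: _ =>
      decide ((pvSatLoop black black.length (PySem.Set.ofList [s])).length = black.length)

-- ===== PRECONDITION & SPEC =====
-- Pre_ excludes exactly the inputs on which Python A raises IndexError: the empty grid
-- (grid[0]) and ragged grids with some row shorter than the first one (grid[i][j]).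
def Pre_check_single_connected_group_py (grid : List (List String)) : Prop :=
  grid ≠ [] ∧ ∀ row ∈ grid, (grid.headI).length ≤ row.length
instance (grid : List (List String)) : Decidable (Pre_check_single_connected_group_py grid) := by
  unfold Pre_check_single_connected_group_py; infer_instance

def pvWitness_check_single_connected_group_py : List (List String) := [["B", "."], [".", "B"]]

def Spec_check_single_connected_group_py (grid : List (List String)) (out : Bool) : Prop := out = check_single_connected_group_py_alt grid
instance (grid : List (List String)) (out : Bool) : Decidable (Spec_check_single_connected_group_py grid out) := by unfold Spec_check_single_connected_group_py; infer_instance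

-- ===== CLAIM (what is proved, stated in full; the proofs are below) =====
def Claim_equal_check_single_connected_group_py : Prop := ∀ (grid : List (List String)), Dom_check_single_connected_group_py grid → Pre_check_single_connected_group_py grid → Spec_check_single_connected_group_py grid (check_single_connected_group_py grid)

-- ===== LEMMAS AND PROOFS =====

-- the 4-neighbour adjacency both programs use
def pvAdj (p q : Int × Int) : Prop :=
  q = (p.1 - 1, p.2) ∨ q = (p.1 + 1, p.2) ∨ q = (p.1, p.2 - 1) ∨ q = (p.1, p.2 + 1)

def pvStep (black : List (Int × Int)) (p q : Int × Int) : Prop := pvAdj p q ∧ q ∈ black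

def pvReach (black : List (Int × Int)) (s p : Int × Int) : Prop :=
  Relation.ReflTransGen (pvStep black) s p

lemma pvAdj_symm {p q : Int × Int} (h : pvAdj p q) : pvAdj q p := by
  obtain ⟨a, b⟩ := p; obtain ⟨c, d⟩ := q
  simp only [pvAdj, Prod.mk.injEq] at h ⊢
  omega

lemma pvAdj_exists_dir {x y : Int} {q : Int × Int} (h : pvAdj (x, y) q) :
    ∃ d ∈ pvDirs, q = (x + d.1, y + d.2) := by
  obtain ⟨c, e⟩ := q
  simp only [pvAdj, Prod.mk.injEq] at h
  rcases h with ⟨h1, h2⟩ | ⟨h1, h2⟩ | ⟨h1, h2⟩ | ⟨h1, h2⟩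
  · exact ⟨(-1, 0), by simp [pvDirs], by simp [Prod.ext_iff]; omega⟩
  · exact ⟨(1, 0), by simp [pvDirs], by simp [Prod.ext_iff]; omega⟩
  · exact ⟨(0, -1), by simp [Prod.ext_iff, pvDirs], by simp [Prod.ext_iff]; omega⟩
  · exact ⟨(0, 1), by simp [Prod.ext_iff, pvDirs], by simp [Prod.ext_iff]; omega⟩

lemma pvReach_mem_black {black : List (Int × Int)} {s p : Int × Int}
    (hs : s ∈ black) (h : pvReach black s p) : p ∈ black := by
  induction h with
  | refl => exact hs
  | tail _ h2 _ => exact h2.2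

lemma pvSet_add_of_not_mem {v : List (Int × Int)} {p : Int × Int} (h : p ∉ v) :
    PySem.Set.add v p = v ++ [p] := by
  simp [PySem.Set.add, PySem.Set.contains, h]

-- characterization of a generic closed, reachable, inhabited set
lemma pvClosed_char {black : List (Int × Int)} {s : Int × Int} {visited : List (Int × Int)}
    (hsv : s ∈ visited) (hr : ∀ p ∈ visited, pvReach black s p)
    (hc : ∀ p ∈ visited, ∀ q, pvStep black p q → q ∈ visited) :
    ∀ p, p ∈ visited ↔ pvReach black s p := by
  intro p
  constructor
  · exact hr p
  · intro h
    induction h with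
    | refl => exact hsv
    | tail _ h2 ih => exact hc _ ih _ h2

-- the black-cell list of A equals the comprehension of B
lemma pvBlackRow_eq (grid : List (List String)) (i : Int) :
    ∀ (js : List Int) (acc : List (Int × Int)),
      pvBlackRow grid i js acc
        = acc ++ (js.filter (fun j => pvCellB grid i j)).map (fun j => (i, j)) := by
  intro js
  induction js with
  | nil => intro acc; simp [pvBlackRow]
  | cons j js ih =>
      intro acc
      by_cases h : pvCellB grid i j
      · simp [pvBlackRow, h, ih]
      · simp [pvBlackRow, h, ih]

lemma pvBlackLoop_eq (grid : List (List String)) (cols : Int) :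
    ∀ (is : List Int) (acc : List (Int × Int)),
      pvBlackLoop grid cols is acc
        = acc ++ is.flatMap (fun i =>
            ((PySem.List.pyRange 0 cols 1).filter (fun j => pvCellB grid i j)).map
              (fun j => (i, j))) := by
  intro is
  induction is with
  | nil => intro acc; simp [pvBlackLoop]
  | cons i is ih => intro acc; simp [pvBlackLoop, pvBlackRow_eq, ih]

lemma pvBlack_eq (grid : List (List String)) (rows cols : Int) :
    pvBlackLoop grid cols (PySem.List.pyRange 0 rows 1) [] = pvBlackComp grid rows cols := by
  simp [pvBlackLoop_eq, pvBlackComp]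

lemma mem_pvBlackComp (grid : List (List String)) (rows cols : Int) (p : Int × Int) :
    p ∈ pvBlackComp grid rows cols ↔
      0 ≤ p.1 ∧ p.1 < rows ∧ 0 ≤ p.2 ∧ p.2 < cols ∧ pvCellB grid p.1 p.2 = true := by
  obtain ⟨a, b⟩ := p
  simp only [pvBlackComp, List.mem_flatMap, List.mem_map, List.mem_filter,
    PySem.List.mem_pyRange_one, Prod.mk.injEq]
  constructor
  · rintro ⟨i, hi, j, ⟨hj, hc⟩, rfl, rfl⟩
    exact ⟨hi.1, hi.2, hj.1, hj.2, hc⟩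
  · rintro ⟨h1, h2, h3, h4, h5⟩
    exact ⟨a, ⟨h1, h2⟩, b, ⟨⟨h3, h4⟩, h5⟩, rfl, rfl⟩

-- one direction-scan step of A's BFS
lemma pvScanDirs_spec (grid : List (List String)) (rows cols x y : Int)
    (black : List (Int × Int))
    (hchar : ∀ q : Int × Int, q ∈ black ↔
      0 ≤ q.1 ∧ q.1 < rows ∧ 0 ≤ q.2 ∧ q.2 < cols ∧ pvCellB grid q.1 q.2 = true) :
    ∀ (ds : List (Int × Int)) (visited queue : List (Int × Int)),
      (∀ d ∈ ds, d ∈ pvDirs) → visited.Nodup →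
      ∃ news, pvScanDirs grid rows cols x y ds visited queue = (visited ++ news, queue ++ news) ∧
        (visited ++ news).Nodup ∧
        (∀ q ∈ news, pvStep black (x, y) q) ∧
        (∀ q : Int × Int, q ∈ black → (∃ d ∈ ds, q = (x + d.1, y + d.2)) →
          q ∈ visited ++ news) := by
  intro ds
  induction ds with
  | nil =>
      intro visited queue _ hnd
      refine ⟨[], by simp [pvScanDirs], by simpa, by simp, ?_⟩
      rintro q _ ⟨d, hd, _⟩
      exact absurd hd (List.not_mem_nil)
  | cons d ds ih =>
      intro visited queue hds hnd
      by_cases hg : 0 ≤ x + d.1 ∧ x + d.1 < rows ∧ 0 ≤ y + d.2 ∧ y + d.2 < cols ∧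
          (x + d.1, y + d.2) ∉ visited ∧ pvCellB grid (x + d.1) (y + d.2) = true
      · have hn : (x + d.1, y + d.2) ∉ visited := hg.2.2.2.2.1
        have hnd' : (visited ++ [(x + d.1, y + d.2)]).Nodup := by
          rw [List.nodup_append]
          refine ⟨hnd, List.nodup_singleton _, ?_⟩
          intro a ha b hb
          simp only [List.mem_singleton] at hb
          subst hb
          exact fun h => hn (h ▸ ha)
        obtain ⟨news, heq, hnd'', hstep, hclo⟩ :=
          ih (visited ++ [(x + d.1, y + d.2)]) (queue ++ [(x + d.1, y + d.2)])
            (fun e he => hds e (List.mem_cons_of_mem _ he)) hnd'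
        have hdmem : d ∈ pvDirs := hds d List.mem_cons_self
        have hadj : pvAdj (x, y) (x + d.1, y + d.2) := by
          simp only [pvDirs, List.mem_cons, List.not_mem_nil, or_false] at hdmem
          rcases hdmem with rfl | rfl | rfl | rfl <;>
            simp [pvAdj, Prod.ext_iff] <;> omega
        have hbmem : (x + d.1, y + d.2) ∈ black :=
          (hchar _).2 ⟨hg.1, hg.2.1, hg.2.2.1, hg.2.2.2.1, hg.2.2.2.2.2⟩
        refine ⟨(x + d.1, y + d.2) :: news, ?_, ?_, ?_, ?_⟩
        · rw [pvScanDirs, if_pos hg, pvSet_add_of_not_mem hn, heq]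
          simp
        · simpa using hnd''
        · intro q hq
          rcases hq with _ | hq
          · exact ⟨hadj, hbmem⟩
          · exact hstep _ (by assumption)
        · intro q hqb hdq
          have : q ∈ (visited ++ [(x + d.1, y + d.2)]) ++ news := by
            rcases hdq with ⟨e, he, rfl⟩
            rcases he with _ | he
            · exact List.mem_append_left _ (List.mem_append_right _ (by simp))
            · exact hclo _ hqb ⟨e, by assumption, rfl⟩
          simpa using this
      · obtain ⟨news, heq, hnd', hstep, hclo⟩ :=
          ih visited queue (fun e he => hds e (List.mem_cons_of_mem _ he)) hnd
        refine ⟨news, ?_, hnd', hstep, ?_⟩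
        · rw [pvScanDirs, if_neg hg, heq]
        · intro q hqb hdq
          rcases hdq with ⟨e, he, rfl⟩
          rcases he with _ | he
          · -- e = d : the guard failed, so the target must already be visited
            by_cases hv : (x + d.1, y + d.2) ∈ visited
            · exact List.mem_append_left _ hv
            · exfalso
              have hb := (hchar (x + d.1, y + d.2)).1 hqb
              exact hg ⟨hb.1, hb.2.1, hb.2.2.1, hb.2.2.2.1, hv, hb.2.2.2.2⟩
          · exact hclo _ hqb ⟨e, by assumption, rfl⟩

-- A's BFS computes exactly the cells reachable from the start
lemma pvBfsLoop_spec (grid : List (List String)) (rows cols : Int)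
    (black : List (Int × Int)) (s : Int × Int)
    (hchar : ∀ q : Int × Int, q ∈ black ↔
      0 ≤ q.1 ∧ q.1 < rows ∧ 0 ≤ q.2 ∧ q.2 < cols ∧ pvCellB grid q.1 q.2 = true)
    (hs : s ∈ black) :
    ∀ (fuel : Nat) (visited queue : List (Int × Int)),
      visited.Nodup → s ∈ visited →
      (∀ p ∈ visited, pvReach black s p) →
      (∀ p ∈ queue, p ∈ visited) →
      (∀ p ∈ visited, p ∉ queue → ∀ q, pvStep black p q → q ∈ visited) →
      queue.length + black.length ≤ fuel + visited.length →
      ((pvBfsLoop grid rows cols fuel visited queue).Nodup ∧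
        ∀ p, p ∈ pvBfsLoop grid rows cols fuel visited queue ↔ pvReach black s p) := by
  intro fuel
  induction fuel with
  | zero =>
      intro visited queue hnd hsv hr hq hf hb
      have hsub : visited ⊆ black := fun p hp => pvReach_mem_black hs (hr p hp)
      have hlen : visited.length ≤ black.length := (hnd.subperm hsub).length_le
      have hq0 : queue = [] := by
        have : queue.length = 0 := by omega
        exact List.length_eq_zero_iff.1 this
      subst hq0
      refine ⟨hnd, pvClosed_char hsv hr ?_⟩
      exact fun p hp => hf p hp (List.not_mem_nil)
  | succ fuel ih =>
      intro visited queue hnd hsv hr hq hf hb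
      cases queue with
      | nil =>
          refine ⟨hnd, pvClosed_char hsv hr ?_⟩
          exact fun p hp => hf p hp (List.not_mem_nil)
      | cons p qs =>
          obtain ⟨news, heq, hnd', hstep, hclo⟩ :=
            pvScanDirs_spec grid rows cols p.1 p.2 black hchar pvDirs visited qs
              (fun d hd => hd) hnd
          have hpv : p ∈ visited := hq p List.mem_cons_self
          have hpr : pvReach black s p := hr p hpv
          rw [pvBfsLoop, heq]
          apply ih
          · exact hnd'
          · exact List.mem_append_left _ hsv
          · intro a ha
            rcases List.mem_append.1 ha with ha | ha
            · exact hr a ha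
            · exact hpr.tail (by simpa using hstep a ha)
          · intro a ha
            rcases List.mem_append.1 ha with ha | ha
            · exact List.mem_append_left _ (hq a (List.mem_cons_of_mem _ ha))
            · exact List.mem_append_right _ ha
          · intro a ha han q hstepq
            rcases List.mem_append.1 ha with ha | ha
            · by_cases hap : a = p
              · subst hap
                have : pvAdj (a.1, a.2) q := by simpa using hstepq.1
                exact hclo q hstepq.2 (pvAdj_exists_dir this)
              · have hanq : a ∉ qs := fun h => han (List.mem_append_left _ h)
                have : a ∉ p :: qs := by
                  intro h
                  rcases h with _ | h
                  · exact hap rfl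
                  · exact hanq (by assumption)
                exact List.mem_append_left _ (hf a ha this q hstepq)
            · exact absurd (List.mem_append_right _ ha) han
          · simp only [List.length_append, List.length_cons] at hb ⊢
            omega

-- one pass of B's saturation loop
lemma pvSatPass_spec (black : List (Int × Int)) (s : Int × Int) :
    ∀ (rest comp : List (Int × Int)) (changed : Bool),
      comp.Nodup → (∀ p ∈ comp, pvReach black s p) → (∀ p ∈ rest, p ∈ black) →
      ∃ news, pvSatPass rest comp changed = (comp ++ news, changed || !news.isEmpty) ∧
        (comp ++ news).Nodup ∧
        (∀ p ∈ comp ++ news, pvReach black s p) ∧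
        (news = [] → ∀ p ∈ rest, p ∉ comp →
          ¬((p.1 - 1, p.2) ∈ comp ∨ (p.1 + 1, p.2) ∈ comp ∨
            (p.1, p.2 - 1) ∈ comp ∨ (p.1, p.2 + 1) ∈ comp)) := by
  intro rest
  induction rest with
  | nil =>
      intro comp changed hnd hr _
      exact ⟨[], by simp [pvSatPass], by simpa, by simpa using hr, by simp⟩
  | cons p rest ih =>
      intro comp changed hnd hr hrest
      by_cases hg : p ∉ comp ∧ ((p.1 - 1, p.2) ∈ comp ∨ (p.1 + 1, p.2) ∈ comp ∨
          (p.1, p.2 - 1) ∈ comp ∨ (p.1, p.2 + 1) ∈ comp)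
      · have hpb : p ∈ black := hrest p List.mem_cons_self
        have hpr : pvReach black s p := by
          obtain ⟨a, b⟩ := p
          rcases hg.2 with hq | hq | hq | hq <;>
            exact (hr _ hq).tail ⟨by simp [pvAdj, Prod.ext_iff], hpb⟩
        have hnd' : (comp ++ [p]).Nodup := by
          rw [List.nodup_append]
          refine ⟨hnd, List.nodup_singleton _, ?_⟩
          intro a ha b hb
          simp only [List.mem_singleton] at hb
          subst hb
          exact fun h => hg.1 (h ▸ ha)
        have hr' : ∀ a ∈ comp ++ [p], pvReach black s a := by
          intro a ha
          rcases List.mem_append.1 ha with ha | ha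
          · exact hr a ha
          · simp at ha; subst ha; exact hpr
        obtain ⟨news, heq, hnd'', hr'', hclo⟩ :=
          ih (comp ++ [p]) true hnd' hr' (fun a ha => hrest a (List.mem_cons_of_mem _ ha))
        refine ⟨p :: news, ?_, by simpa using hnd'', by simpa using hr'', by simp⟩
        rw [pvSatPass, if_pos hg, pvSet_add_of_not_mem hg.1, heq]
        simp
      · obtain ⟨news, heq, hnd', hr', hclo⟩ :=
          ih comp changed hnd hr (fun a ha => hrest a (List.mem_cons_of_mem _ ha))
        refine ⟨news, ?_, hnd', hr', ?_⟩
        · rw [pvSatPass, if_neg hg, heq]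
        · intro hne a ha hanotin
          rcases ha with _ | ha
          · intro hdisj; exact hg ⟨hanotin, hdisj⟩
          · exact hclo hne a (by assumption) hanotin

-- B's saturation loop computes exactly the cells reachable from the start
lemma pvSatLoop_spec (black : List (Int × Int)) (s : Int × Int) (hs : s ∈ black) :
    ∀ (fuel : Nat) (comp : List (Int × Int)),
      comp.Nodup → s ∈ comp → (∀ p ∈ comp, pvReach black s p) →
      black.length + 1 ≤ fuel + comp.length →
      ((pvSatLoop black fuel comp).Nodup ∧
        ∀ p, p ∈ pvSatLoop black fuel comp ↔ pvReach black s p) := by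
  intro fuel
  induction fuel with
  | zero =>
      intro comp hnd hsc hr hb
      exfalso
      have hsub : comp ⊆ black := fun p hp => pvReach_mem_black hs (hr p hp)
      have := (hnd.subperm hsub).length_le
      omega
  | succ fuel ih =>
      intro comp hnd hsc hr hb
      obtain ⟨news, heq, hnd', hr', hclo⟩ :=
        pvSatPass_spec black s black comp false hnd hr (fun a ha => ha)
      by_cases hne : news = []
      · subst hne
        have hcond : (pvSatPass black comp false).2 = false := by simp [heq]
        rw [pvSatLoop, hcond, if_neg (by simp), heq]
        simp only [List.append_nil]
        refine ⟨hnd, pvClosed_char hsc hr ?_⟩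
        intro a ha q hstepq
        by_cases hqc : q ∈ comp
        · exact hqc
        · exfalso
          have hadj : pvAdj q a := pvAdj_symm hstepq.1
          refine hclo rfl q hstepq.2 hqc ?_
          obtain ⟨c, e⟩ := q
          obtain ⟨f, g⟩ := a
          simp only [pvAdj, Prod.mk.injEq] at hadj
          rcases hadj with ⟨h1, h2⟩ | ⟨h1, h2⟩ | ⟨h1, h2⟩ | ⟨h1, h2⟩
          · exact Or.inl (by simpa [h1, h2] using ha)
          · exact Or.inr (Or.inl (by simpa [h1, h2] using ha))
          · exact Or.inr (Or.inr (Or.inl (by simpa [h1, h2] using ha)))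
          · exact Or.inr (Or.inr (Or.inr (by simpa [h1, h2] using ha)))
      · have hcond : (pvSatPass black comp false).2 = true := by
          rw [heq]; simpa using hne
        rw [pvSatLoop, hcond, if_pos rfl, heq]
        apply ih
        · exact hnd'
        · exact List.mem_append_left _ hsc
        · exact hr'
        · have : 1 ≤ news.length := List.length_pos_iff.2 hne
          simp only [List.length_append]
          omega

-- ===== VERDICT (by name: the statement is the Claim_ definition above) =====
theorem check_single_connected_group_py_spec : Claim_equal_check_single_connected_group_py := by
  intro grid _hdom _hpre
  unfold Spec_check_single_connected_group_py
  unfold check_single_connected_group_py check_single_connected_group_py_alt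
  simp only [pvBlack_eq]
  set rows : Int := (grid.length : Int) with hrows
  set cols : Int := (((PySem.List.pyGet? grid 0).getD []).length : Int) with hcols
  cases hbk : pvBlackComp grid rows cols with
  | nil => simp
  | cons s rest =>
      simp only []
      have hchar : ∀ q : Int × Int, q ∈ s :: rest ↔
          0 ≤ q.1 ∧ q.1 < rows ∧ 0 ≤ q.2 ∧ q.2 < cols ∧ pvCellB grid q.1 q.2 = true := by
        intro q; rw [← hbk]; exact mem_pvBlackComp grid rows cols q
      have hs : s ∈ s :: rest := List.mem_cons_self
      have hofl : PySem.Set.ofList [s] = [s] := rfl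
      rw [hofl]
      obtain ⟨hnd1, hm1⟩ := pvBfsLoop_spec grid rows cols (s :: rest) s hchar hs
        (s :: rest).length [s] [s] (by simp) (by simp)
        (by intro p hp; simp at hp; subst hp; exact Relation.ReflTransGen.refl)
        (by intro p hp; exact hp)
        (by intro p hp hnp; exact absurd hp hnp)
        (by simp only [List.length_cons, List.length_nil]; omega)
      obtain ⟨hnd2, hm2⟩ := pvSatLoop_spec (s :: rest) s hs (s :: rest).length [s]
        (by simp) (by simp)
        (by intro p hp; simp at hp; subst hp; exact Relation.ReflTransGen.refl)
        (by simp only [List.length_cons, List.length_nil]; omega)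
      have hlen : (pvBfsLoop grid rows cols (s :: rest).length [s] [s]).length
          = (pvSatLoop (s :: rest) (s :: rest).length [s]).length :=
        ((List.perm_ext_iff_of_nodup hnd1 hnd2).2
          (fun p => (hm1 p).trans ((hm2 p).symm))).length_eq
      rw [hlen]
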